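-- pv_equiv track=rewrite | github.com/kimdozzi/Baekjoonhub | 프로그래머스/2/17687. ［3차］ n진수 게임/［3차］ n진수 게임.py | solution
-- ===== SOURCE A (Python) =====
-- def solution(n, t, m, p):
--     def solve(x, k):
--         s = "0"
--         while x:
--             tmp = str(x%k)
--
--             if tmp == '10' :
--                 s += 'A'
--             elif tmp == '11' :
--                 s += 'B'
--             elif tmp == '12' :
--                 s += 'C'
--             elif tmp == '13' :
--                 s += 'D'
--             elif tmp == '14' :
--                 s += 'E'
--             elif tmp == '15' :
--                 s += 'F'
--             else :
--                 s += tmp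
--             x //= k
--
--         if not s :
--             return '0'
--         return s[::-1]
--
--     max_length = 0
--     num = ''
--     for i in range(1, m * t) :
--         num += solve(i, n)
--         max_length += len(num)
--
--
--     return num[p-1::m][:t]
-- ===== SOURCE B (Python) =====
-- def solution(n, t, m, p):
--     DIGITS = "0123456789ABCDEF"
--
--     def rep(x):
--         return rep(x // n) + DIGITS[x % n] if x else ""
--
--     num = "".join(rep(i) + "0" for i in range(1, m * t))
--     return num[p - 1::m][:t]
-- ===== Notes on version B (the rewrite author's own statement) =====
-- stated objective: idiomatic
-- what changed: Each number's base-n representation is produced by a direct recursion with a digit-table lookup (DIGITS[x % n]) instead of A's while-loop that appends str(x % n) low-digit-first through an eight-branch if/elif chain and then reverses the string, and the stream is assembled with a single ''.join over a generator instead of repeated string += together with A's dead max_length accumulator.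
-- outside the precondition, e.g. on solution(17, 20, 1, 1): A returns '102030405060708090A0', B raises IndexError; on solution(-3, 2, 2, 1): A returns '12', B returns 'F0'
import Mathlib
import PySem

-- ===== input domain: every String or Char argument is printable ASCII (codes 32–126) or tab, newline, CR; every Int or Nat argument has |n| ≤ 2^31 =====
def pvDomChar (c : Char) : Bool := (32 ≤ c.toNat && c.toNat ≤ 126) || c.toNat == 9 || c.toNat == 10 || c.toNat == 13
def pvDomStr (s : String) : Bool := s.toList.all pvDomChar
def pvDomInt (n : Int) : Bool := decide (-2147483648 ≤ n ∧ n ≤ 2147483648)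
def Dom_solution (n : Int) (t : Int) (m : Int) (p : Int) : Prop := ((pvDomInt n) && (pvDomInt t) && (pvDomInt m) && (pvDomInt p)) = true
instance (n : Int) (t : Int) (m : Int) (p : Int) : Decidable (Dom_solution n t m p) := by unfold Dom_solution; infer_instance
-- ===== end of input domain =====

-- B replaces A's while-loop digit extraction (str(x%k) mapped through an if/elif chain, then
-- string reversal) by a direct recursion with a digit-table lookup, and the repeated `num +=`
-- accumulation by a single join; the return value is proved identical on Pre_ (see Pre_solution).

-- ===== PORT A =====
-- the while-loop of `solve`: fuel-bounded (fuel x.natAbs+1 is enough on Pre_; the guard only totalizes)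
def pvSolveLoopA (n : Int) : Nat → Int → String → String
  | 0, _, s => s
  | fuel + 1, x, s =>
    if x ≠ 0 then
      let tmp := PySem.Int.toStr (PySem.Int.mod x n)
      let s' :=
        if tmp = "10" then s ++ "A"
        else if tmp = "11" then s ++ "B"
        else if tmp = "12" then s ++ "C"
        else if tmp = "13" then s ++ "D"
        else if tmp = "14" then s ++ "E"
        else if tmp = "15" then s ++ "F"
        else s ++ tmp
      pvSolveLoopA n fuel (PySem.Int.floordiv x n) s'
    else s

def pvSolveA (x : Int) (k : Int) : String :=
  let s := pvSolveLoopA k (x.natAbs + 1) x "0"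
  if s = "" then "0"
  else (PySem.Str.slice? s none none (-1)).getD ""   -- s[::-1]; step -1 ≠ 0 so never none

def solution (n : Int) (t : Int) (m : Int) (p : Int) : String :=
  let st := (PySem.List.pyRange 1 (m * t) 1).foldl
    (fun (st : String × Int) i =>
      let num := st.1 ++ pvSolveA i n
      (num, st.2 + (PySem.Str.len num : Int)))
    ("", 0)
  let num := st.1
  PySem.Str.slice ((PySem.Str.slice? num (some (p - 1)) none m).getD "") none (some t)

-- ===== PORT B =====
def pvDigitsB : String := "0123456789ABCDEF"

-- rep(x) = rep(x // n) + DIGITS[x % n] if x else ""   (fuel-bounded recursion; getD ' ' totalizes the index)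
def pvRepB (n : Int) : Nat → Int → String
  | 0, _ => ""
  | fuel + 1, x =>
    if x ≠ 0 then
      pvRepB n fuel (PySem.Int.floordiv x n) ++
        ((PySem.Str.pyGet? pvDigitsB (PySem.Int.mod x n)).getD ' ').toString
    else ""

def solution_alt (n : Int) (t : Int) (m : Int) (p : Int) : String :=
  let num := PySem.Str.join "" ((PySem.List.pyRange 1 (m * t) 1).map
    (fun i => pvRepB n (i.natAbs + 1) i ++ "0"))
  PySem.Str.slice ((PySem.Str.slice? num (some (p - 1)) none m).getD "") none (some t)

-- ===== PRECONDITION & SPEC =====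
-- Pre_ requires m ≠ 0 (for m = 0 A raises ValueError: slice step 0) and, whenever the stream is
-- non-empty (m*t ≥ 2), a base n ≥ 2 whose digit values all stay below 16 (n ≤ 16, or m*t ≤ 16 so
-- only single digits < 16 occur): for n = 0 A raises ZeroDivisionError, for n = 1 it loops forever,
-- and for n < 0 or digit values ≥ 16 A's "digits" (multi-char str(x%n), negative remainders) are an
-- accident of the if/elif chain that B's 16-entry digit table would index-error on or render otherwise.
def Pre_solution (n : Int) (t : Int) (m : Int) (p : Int) : Prop :=
  m ≠ 0 ∧ (m * t ≤ 1 ∨ (2 ≤ n ∧ (n ≤ 16 ∨ m * t ≤ 16)))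
instance (n : Int) (t : Int) (m : Int) (p : Int) : Decidable (Pre_solution n t m p) := by
  unfold Pre_solution; infer_instance

def pvWitness_solution : Int × Int × Int × Int := (16, 2, 3, 2)

def Spec_solution (n : Int) (t : Int) (m : Int) (p : Int) (out : String) : Prop := out = solution_alt n t m p
instance (n : Int) (t : Int) (m : Int) (p : Int) (out : String) : Decidable (Spec_solution n t m p out) := by unfold Spec_solution; infer_instance

-- ===== CLAIM (what is proved, stated in full; the proofs are below) =====
def Claim_equal_solution : Prop := ∀ (n : Int) (t : Int) (m : Int) (p : Int), Dom_solution n t m p → Pre_solution n t m p → Spec_solution n t m p (solution n t m p)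

-- ===== LEMMAS AND PROOFS =====

-- A's if/elif chain on str(d) appends exactly the table character DIGITS[d], for 0 ≤ d < 16
theorem pvDigit_eq (d : Int) (h0 : 0 ≤ d) (h1 : d < 16) (s : String) :
    (if PySem.Int.toStr d = "10" then s ++ "A"
     else if PySem.Int.toStr d = "11" then s ++ "B"
     else if PySem.Int.toStr d = "12" then s ++ "C"
     else if PySem.Int.toStr d = "13" then s ++ "D"
     else if PySem.Int.toStr d = "14" then s ++ "E"
     else if PySem.Int.toStr d = "15" then s ++ "F"
     else s ++ PySem.Int.toStr d)
    = s ++ ((PySem.Str.pyGet? pvDigitsB d).getD ' ').toString := by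
  interval_cases d <;> rfl

-- the loop of solve builds, onto s, the digits of x low-order first; rep builds them high-order first
theorem pvLoop_eq (n : Int) (hn2 : 2 ≤ n) :
    ∀ N : Nat, ∀ x : Int, x.natAbs ≤ N → 0 ≤ x → (n ≤ 16 ∨ x < 16) →
    ∀ f1 f2 : Nat, x.natAbs < f1 → x.natAbs < f2 → ∀ s : String,
      (pvSolveLoopA n f1 x s).toList = s.toList ++ (pvRepB n f2 x).toList.reverse := by
  intro N
  induction N with
  | zero =>
    intro x hxN hx0 _hsm f1 f2 hf1 hf2 s
    have hx : x = 0 := by omega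
    subst hx
    obtain ⟨g, rfl⟩ : ∃ g, f1 = g + 1 := ⟨f1 - 1, by omega⟩
    obtain ⟨h, rfl⟩ : ∃ h, f2 = h + 1 := ⟨f2 - 1, by omega⟩
    simp [pvSolveLoopA, pvRepB]
  | succ N ih =>
    intro x hxN hx0 hsm f1 f2 hf1 hf2 s
    obtain ⟨g, rfl⟩ : ∃ g, f1 = g + 1 := ⟨f1 - 1, by omega⟩
    obtain ⟨h, rfl⟩ : ∃ h, f2 = h + 1 := ⟨f2 - 1, by omega⟩
    by_cases hx : x = 0
    · subst hx; simp [pvSolveLoopA, pvRepB]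
    · have hx1 : 1 ≤ x := by omega
      have hd0 : 0 ≤ PySem.Int.mod x n := PySem.Int.mod_nonneg x (by omega)
      have hd16 : PySem.Int.mod x n < 16 := by
        rcases hsm with h16 | hxs
        · exact lt_of_lt_of_le (PySem.Int.mod_lt x (by omega)) h16
        · have hm : PySem.Int.mod x n ≤ x := by
            have he : PySem.Int.mod x n = x % n := PySem.Int.mod_eq_emod_of_pos (by omega)
            have hq : 0 ≤ x / n := Int.ediv_nonneg hx0 (by omega)
            have hdef : x % n = x - n * (x / n) := Int.emod_def x n
            nlinarith
          omega
      have hx'0 : 0 ≤ PySem.Int.floordiv x n :=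
        (PySem.Int.le_floordiv_iff_mul_le (by omega)).mpr (by omega)
      have hx'lt : PySem.Int.floordiv x n < x :=
        (PySem.Int.floordiv_lt_iff_lt_mul (by omega)).mpr (by nlinarith)
      have hx'N : (PySem.Int.floordiv x n).natAbs ≤ N := by omega
      have hsm' : n ≤ 16 ∨ PySem.Int.floordiv x n < 16 := by
        rcases hsm with h16 | hxs
        · exact Or.inl h16
        · exact Or.inr (by omega)
      have hrec := ih (PySem.Int.floordiv x n) hx'N hx'0 hsm' g h (by omega) (by omega)
        (s ++ ((PySem.Str.pyGet? pvDigitsB (PySem.Int.mod x n)).getD ' ').toString)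
      simp only [pvSolveLoopA, if_pos hx, ne_eq]
      rw [pvDigit_eq (PySem.Int.mod x n) hd0 hd16 s] at *
      rw [hrec]
      simp only [pvRepB, if_pos hx, ne_eq]
      simp

-- for 1 ≤ x, solve(x, n) = rep(x) + "0"
theorem pvSolve_eq (n : Int) (hn2 : 2 ≤ n) (x : Int) (hx : 1 ≤ x) (hsm : n ≤ 16 ∨ x < 16) :
    pvSolveA x n = pvRepB n (x.natAbs + 1) x ++ "0" := by
  unfold pvSolveA
  have hs := pvLoop_eq n hn2 x.natAbs x le_rfl (by omega) hsm
    (x.natAbs + 1) (x.natAbs + 1) (by omega) (by omega) "0"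
  have hne : pvSolveLoopA n (x.natAbs + 1) x "0" ≠ "" := by
    intro hemp
    have : (pvSolveLoopA n (x.natAbs + 1) x "0").toList = [] :=
      String.toList_eq_nil_iff.mpr hemp
    rw [hs] at this
    simp at this
  rw [if_neg hne]
  apply String.toList_inj.mp
  rw [PySem.Str.slice?]
  rw [PySem.Chars.slice?]
  rw [PySem.List.slice?_none_none_neg_one]
  simp [hs, String.toList_append]

-- A's accumulator fold equals the join of the per-number blocks
-- join with empty separator peels off the head block
theorem pvJoin_cons (a : String) (r : List String) :
    PySem.Str.join "" (a :: r) = a ++ PySem.Str.join "" r := by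
  cases r with
  | nil =>
    apply String.toList_inj.mp
    simp [PySem.Str.join, PySem.Chars.join_singleton, PySem.Chars.join_nil]
  | cons b rr =>
    apply String.toList_inj.mp
    simp [PySem.Str.join, PySem.Chars.join_cons_cons, String.toList_append]

theorem pvFold_eq (n : Int) (hn2 : 2 ≤ n) :
    ∀ l : List Int, (∀ i ∈ l, 1 ≤ i ∧ (n ≤ 16 ∨ i < 16)) → ∀ (s : String) (ml : Int),
      (l.foldl
        (fun (st : String × Int) i =>
          let num := st.1 ++ pvSolveA i n
          (num, st.2 + (PySem.Str.len num : Int)))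
        (s, ml)).1
      = s ++ PySem.Str.join "" (l.map (fun i => pvRepB n (i.natAbs + 1) i ++ "0")) := by
  intro l
  induction l with
  | nil => intro _ s ml; simp [PySem.Str.join, PySem.Chars.join_nil]
  | cons i rest ih =>
    intro hmem s ml
    have hi := hmem i (by simp)
    simp only [List.foldl_cons, List.map_cons]
    rw [ih (fun j hj => hmem j (by simp [hj]))]
    rw [pvSolve_eq n hn2 i hi.1 hi.2]
    rw [pvJoin_cons]
    rw [String.append_assoc]

-- ===== VERDICT (by name: the statement is the Claim_ definition above) =====
theorem solution_spec : Claim_equal_solution := by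
  intro n t m p _hdom hpre
  unfold Spec_solution solution solution_alt
  rcases hpre.2 with hdeg | ⟨hn2, hsm⟩
  · have hrange : PySem.List.pyRange 1 (m * t) 1 = [] := by
      rw [List.eq_nil_iff_forall_not_mem]
      intro x hx
      have := PySem.List.mem_pyRange_one.mp hx
      omega
    simp only [hrange]
    rfl
  · have hnum := pvFold_eq n hn2 (PySem.List.pyRange 1 (m * t) 1)
      (fun i hi => by
        have := PySem.List.mem_pyRange_one.mp hi
        exact ⟨this.1, by omega⟩) "" 0
    simp only [hnum]
    rfl
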